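-- pv_equiv track=rewrite | github.com/zseen/hackerrank-challenges | Python/Heap/JesseAndCookies.py | cookies
-- ===== SOURCE A (Python) =====
-- import heapq
--
-- def cookies(desiredSweetnessRate, cookiesList):
--     operationsCounter = 0
--     heapq.heapify(cookiesList)
--
--     while len(cookiesList) > 1 and cookiesList[0] < desiredSweetnessRate:
--             currentCookie = heapq.heappop(cookiesList)
--             nextCookie = heapq.heappop(cookiesList)
--             mergedCookie = (1 * currentCookie) + (2 * nextCookie)
--             heapq.heappush(cookiesList, mergedCookie)
--             operationsCounter += 1
--
--     if cookiesList[0] >= desiredSweetnessRate: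
--         return operationsCounter
--
--     return -1
-- ===== SOURCE B (Python) =====
-- def cookies(desiredSweetnessRate, cookiesList):
--     # Unordered-bag selection: no heap and no sorted order is ever maintained;
--     # each round rescans the bag with min() for the two smallest cookies.
--     # Mutates cookiesList (remove/append) like A mutates it (heapify) -- return value is what matches.
--     operationsCounter = 0
--     while len(cookiesList) > 1 and min(cookiesList) < desiredSweetnessRate:
--         currentCookie = min(cookiesList)
--         cookiesList.remove(currentCookie)
--         nextCookie = min(cookiesList)
--         cookiesList.remove(nextCookie)
--         cookiesList.append(currentCookie + 2 * nextCookie)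
--         operationsCounter += 1
--     if min(cookiesList) >= desiredSweetnessRate:
--         return operationsCounter
--     return -1
-- ===== Notes on version B (the rewrite author's own statement) =====
-- stated objective: simpler
-- what changed: Drops the binary heap entirely: B keeps the cookies as an unordered bag and each round selects the two smallest by a plain min() rescan (remove/remove/append), no priority structure or ordering ever maintained; correct because each round's result depends only on the multiset's two smallest values.
-- outside the precondition, e.g. on cookies(5, []): A raises IndexError, B raises ValueError
import Mathlib
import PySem

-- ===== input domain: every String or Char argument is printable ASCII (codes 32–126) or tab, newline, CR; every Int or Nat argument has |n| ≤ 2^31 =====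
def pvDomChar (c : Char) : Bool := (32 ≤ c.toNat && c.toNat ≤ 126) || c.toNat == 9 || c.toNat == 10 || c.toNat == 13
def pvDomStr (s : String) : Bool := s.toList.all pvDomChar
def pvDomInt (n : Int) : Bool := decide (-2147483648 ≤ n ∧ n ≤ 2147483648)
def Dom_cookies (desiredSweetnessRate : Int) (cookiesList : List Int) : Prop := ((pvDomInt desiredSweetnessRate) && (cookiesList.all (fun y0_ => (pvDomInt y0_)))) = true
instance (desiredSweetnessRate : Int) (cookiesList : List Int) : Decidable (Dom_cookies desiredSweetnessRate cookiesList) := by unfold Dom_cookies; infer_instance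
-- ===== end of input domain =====

-- B drops the heap entirely: an unordered bag rescanned with min() each round (selection by
-- linear scan, no priority structure); same return value. In Python both A and B mutate the
-- argument list in place (A heapifies it, B removes/appends) — the equivalence proved here is
-- about the RETURN value only.

-- ===== PORT A =====
-- A uses the CPython heapq library; PySem has no heap primitives, so heapify/heappop/heappush are
-- ported by hand below, step for step from CPython's Lib/heapq.py (_siftdown, _siftup, heapify,
-- heappop, heappush); exact for integer elements.

-- list indexing: every read A performs is at an in-range index (guarded by the loop condition /
-- Pre_cookies), so `getD _ 0` is exact there; the default is never returned on admitted inputs.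
def pget (h : List Int) (i : Nat) : Int := h.getD i 0

-- termination helpers (cited by name in decreasing_by: keeps the recursive definitions' proof terms small)
theorem pvDecParent {s q : Nat} (h : s < q) : (q - 1) / 2 < q :=
  Nat.lt_of_le_of_lt (Nat.div_le_self _ _)
    (Nat.sub_lt (Nat.lt_of_le_of_lt (Nat.zero_le s) h) Nat.one_pos)

theorem pvDecChild {ep pos c : Nat} (h1 : 2 * pos + 1 ≤ c) (h2 : c < ep) : ep - c < ep - pos :=
  have hpc : pos < c :=
    Nat.lt_of_lt_of_le (Nat.lt_succ_of_le (Nat.le_mul_of_pos_left pos Nat.zero_lt_two)) h1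
  Nat.sub_lt_sub_left (Nat.lt_trans hpc h2) hpc

-- CPython _siftdown's while loop (bubble-up): carries the mutated list and the moving hole `pos`.
def sdLoop (heap : List Int) (startpos : Nat) (newitem : Int) (pos : Nat) : List Int × Nat :=
  if _h : startpos < pos then
    let parentpos := (pos - 1) / 2
    let parent := pget heap parentpos
    if newitem < parent then
      sdLoop (heap.set pos parent) startpos newitem parentpos
    else (heap, pos)
  else (heap, pos)
  termination_by pos
  decreasing_by exact pvDecParent _h

-- CPython _siftdown: read newitem, run the loop, write newitem at the final hole.
def siftdown (heap : List Int) (startpos pos : Nat) : List Int :=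
  let newitem := pget heap pos
  let r := sdLoop heap startpos newitem pos
  r.1.set r.2 newitem

-- CPython _siftup's while loop (move the smaller child up until the hole is a leaf).
def suLoop (heap : List Int) (endpos : Nat) (pos : Nat) : List Int × Nat :=
  if _h : 2 * pos + 1 < endpos then
    let childpos :=
      if 2 * pos + 2 < endpos ∧ ¬ (pget heap (2 * pos + 1) < pget heap (2 * pos + 2)) then
        2 * pos + 2
      else 2 * pos + 1
    suLoop (heap.set pos (pget heap childpos)) endpos childpos
  else (heap, pos)
  termination_by endpos - pos
  decreasing_by split
                next hcond => exact pvDecChild (Nat.le_succ _) hcond.1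
                next hcond => exact pvDecChild (Nat.le_refl _) _h

-- CPython _siftup(heap, pos): sift to a leaf, place newitem there, then _siftdown back up.
def siftup (heap : List Int) (pos : Nat) : List Int :=
  let newitem := pget heap pos
  let r := suLoop heap heap.length pos
  siftdown (r.1.set r.2 newitem) pos r.2

-- heapq.heappush: append then _siftdown(heap, 0, len-1).
def heappush (heap : List Int) (item : Int) : List Int :=
  siftdown (heap ++ [item]) 0 heap.length

-- heapq.heappop: pop the last element; if the heap is still nonempty, move it to the root and
-- _siftup(heap, 0).  (A never calls it on an empty list: the loop guard ensures len > 1 resp. ≥ 1.)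
def heappop (heap : List Int) : Int × List Int :=
  let lastelt := pget heap (heap.length - 1)
  let rest := heap.dropLast
  if rest.isEmpty then (lastelt, rest)
  else (pget rest 0, siftup (rest.set 0 lastelt) 0)

-- heapq.heapify: for i in reversed(range(n // 2)): _siftup(x, i)
def heapify (heap : List Int) : List Int :=
  (List.range (heap.length / 2)).reverse.foldl (fun acc i => siftup acc i) heap

-- A's while loop, carried state = (heap list, operations counter); each iteration shrinks the
-- heap by one, so an initial fuel of `heap.length` (supplied by `loopA` below) makes the same
-- computation total without changing it on any reachable state.
def loopAF (fuel : Nat) (r : Int) (heap : List Int) (ops : Int) : List Int × Int :=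
  match fuel with
  | 0 => (heap, ops)
  | fuel + 1 =>
    if 1 < heap.length ∧ pget heap 0 < r then
      let p1 := heappop heap
      let p2 := heappop p1.2
      let merged := 1 * p1.1 + 2 * p2.1
      loopAF fuel r (heappush p2.2 merged) (ops + 1)
    else (heap, ops)

def loopA (r : Int) (heap : List Int) (ops : Int) : List Int × Int :=
  loopAF heap.length r heap ops

-- final `cookiesList[0]` read: in range for nonempty lists (Pre_cookies); on [] Python raises IndexError.
def cookies (desiredSweetnessRate : Int) (cookiesList : List Int) : Int :=
  let h := heapify cookiesList
  let p := loopA desiredSweetnessRate h 0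
  if desiredSweetnessRate ≤ pget p.1 0 then p.2 else -1

-- ===== PORT B =====
-- Python's min() over a nonempty list: fold of the binary min over the tail (ties keep the
-- first occurrence's VALUE, which for Int is the value itself — exact). min([]) raises
-- ValueError; B only calls it on nonempty bags (loop guard / Pre_cookies); the 0 default is
-- never returned on admitted inputs.
def pymin : List Int → Int
  | [] => 0
  | a :: t => t.foldl min a

-- cited by name in loopC's decreasing_by
theorem foldl_min_mem : ∀ (t : List Int) (a : Int), t.foldl min a ∈ a :: t := by
  intro t
  induction t with
  | nil => intro a; simp
  | cons b t ih =>
    intro a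
    show t.foldl min (min a b) ∈ a :: b :: t
    rcases List.mem_cons.mp (ih (min a b)) with h | h
    · rw [h]
      rcases min_choice a b with hm | hm <;> rw [hm] <;> simp
    · simp [h]

theorem pymin_mem {s : List Int} (h : s ≠ []) : pymin s ∈ s := by
  cases s with
  | nil => exact absurd rfl h
  | cons a t => exact foldl_min_mem t a

theorem pvDecLoopC {s : List Int} (h : 1 < s.length) :
    ((s.erase (pymin s)).erase (pymin (s.erase (pymin s)))
      ++ [pymin s + 2 * pymin (s.erase (pymin s))]).length < s.length := by
  have hne : s ≠ [] := by intro he; rw [he] at h; simp at h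
  have h1 : (s.erase (pymin s)).length = s.length - 1 :=
    List.length_erase_of_mem (pymin_mem hne)
  have h1ne : s.erase (pymin s) ≠ [] := by
    intro he
    rw [he] at h1
    simp at h1
    omega
  have h2 : ((s.erase (pymin s)).erase (pymin (s.erase (pymin s)))).length
      = (s.erase (pymin s)).length - 1 :=
    List.length_erase_of_mem (pymin_mem h1ne)
  simp only [List.length_append, List.length_cons, List.length_nil, h2, h1]
  omega

-- B's while loop: bag carried as-is (no order), two min() scans + first-occurrence removals.
def loopC (r : Int) (s : List Int) (ops : Int) : List Int × Int :=
  if _h : 1 < s.length ∧ pymin s < r then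
    let s1 := s.erase (pymin s)
    let s2 := s1.erase (pymin s1)
    loopC r (s2 ++ [pymin s + 2 * pymin s1]) (ops + 1)
  else (s, ops)
  termination_by s.length
  decreasing_by exact pvDecLoopC _h.1

def cookies_alt (desiredSweetnessRate : Int) (cookiesList : List Int) : Int :=
  let p := loopC desiredSweetnessRate cookiesList 0
  if desiredSweetnessRate ≤ pymin p.1 then p.2 else -1

-- ===== PRECONDITION & SPEC =====
-- Pre_ excludes only the empty list, on which both A and B raise (A IndexError at cookiesList[0],
-- B ValueError at min(cookiesList)).
def Pre_cookies (desiredSweetnessRate : Int) (cookiesList : List Int) : Prop :=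
  cookiesList ≠ []
instance (desiredSweetnessRate : Int) (cookiesList : List Int) : Decidable (Pre_cookies desiredSweetnessRate cookiesList) := by unfold Pre_cookies; infer_instance

def pvWitness_cookies : Int × List Int := (10, [1, 2, 3, 9, 10, 12])

def Spec_cookies (desiredSweetnessRate : Int) (cookiesList : List Int) (out : Int) : Prop := out = cookies_alt desiredSweetnessRate cookiesList
instance (desiredSweetnessRate : Int) (cookiesList : List Int) (out : Int) : Decidable (Spec_cookies desiredSweetnessRate cookiesList out) := by unfold Spec_cookies; infer_instance

-- ===== CLAIM (what is proved, stated in full; the proofs are below) =====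
def Claim_equal_cookies : Prop := ∀ (desiredSweetnessRate : Int) (cookiesList : List Int), Dom_cookies desiredSweetnessRate cookiesList → Pre_cookies desiredSweetnessRate cookiesList → Spec_cookies desiredSweetnessRate cookiesList (cookies desiredSweetnessRate cookiesList)

-- ===== LEMMAS AND PROOFS =====

-- length preservation of the sift operations (proof-side)
theorem sdLoop_len (heap : List Int) (s : Nat) (x : Int) (q : Nat) :
    (sdLoop heap s x q).1.length = heap.length := by
  fun_induction sdLoop with
  | case1 a q h pp pv hx ih => rw [ih, List.length_set]
  | case2 a q h pp pv hx => rfl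
  | case3 a q h => rfl

theorem suLoop_len (heap : List Int) (ep q : Nat) :
    (suLoop heap ep q).1.length = heap.length := by
  fun_induction suLoop with
  | case1 a q h cp ih => rw [ih, List.length_set]
  | case2 a q h => rfl

theorem siftdown_len (heap : List Int) (s q : Nat) :
    (siftdown heap s q).length = heap.length := by
  show ((sdLoop heap s (pget heap q) q).1.set (sdLoop heap s (pget heap q) q).2
    (pget heap q)).length = heap.length
  rw [List.length_set, sdLoop_len]

theorem siftup_len (heap : List Int) (q : Nat) :
    (siftup heap q).length = heap.length := by
  show (siftdown ((suLoop heap heap.length q).1.set (suLoop heap heap.length q).2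
    (pget heap q)) q (suLoop heap heap.length q).2).length = heap.length
  rw [siftdown_len, List.length_set, suLoop_len]


-- `Desc s q`: q lies in the binary-heap subtree rooted at s (reachable from s by child steps).
theorem pvDecParent2 {s q : Nat} (h : ¬ q ≤ s) : (q - 1) / 2 < q :=
  pvDecParent (Nat.lt_of_not_le h)

def Desc (s q : Nat) : Prop :=
  if q ≤ s then q = s else Desc s ((q - 1) / 2)
  termination_by q
  decreasing_by rename_i hh; exact pvDecParent2 hh

theorem Desc_self (s : Nat) : Desc s s := by
  unfold Desc; simp

theorem Desc_le {s q : Nat} (h : Desc s q) : s ≤ q := by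
  unfold Desc at h; split at h <;> omega

theorem Desc_parent {s q : Nat} (h : Desc s q) (hne : q ≠ s) : Desc s ((q - 1) / 2) := by
  have hle := Desc_le h
  unfold Desc at h
  rw [if_neg (by omega)] at h
  exact h

theorem Desc_child1 {s q : Nat} (h : Desc s q) : Desc s (2 * q + 1) := by
  have hle := Desc_le h
  unfold Desc
  rw [if_neg (by omega), show (2 * q + 1 - 1) / 2 = q by omega]
  exact h

theorem Desc_child2 {s q : Nat} (h : Desc s q) : Desc s (2 * q + 2) := by
  have hle := Desc_le h
  unfold Desc
  rw [if_neg (by omega), show (2 * q + 2 - 1) / 2 = q by omega]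
  exact h

theorem Desc_zero (q : Nat) : Desc 0 q := by
  induction q using Nat.strong_induction_on with
  | _ q ih =>
    unfold Desc
    split
    · omega
    · exact ih _ (by omega)

theorem pget_set_self {h : List Int} {i : Nat} (hi : i < h.length) (v : Int) :
    pget (h.set i v) i = v := by
  simp [pget, List.getD_eq_getElem?_getD, hi]

theorem pget_set_ne {h : List Int} {i j : Nat} (hne : i ≠ j) (v : Int) :
    pget (h.set i v) j = pget h j := by
  simp [pget, List.getD_eq_getElem?_getD, List.getElem?_set_ne hne]

theorem pget_set (h : List Int) {i : Nat} (hi : i < h.length) (v : Int) (j : Nat) :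
    pget (h.set i v) j = if j = i then v else pget h j := by
  split
  · rename_i he; subst he; exact pget_set_self hi v
  · rename_i hne; exact pget_set_ne (fun he => hne he.symm) v

theorem multiset_set (h : List Int) (i : Nat) (hi : i < h.length) (v : Int) :
    pget h i ::ₘ ((h.set i v : List Int) : Multiset Int) = v ::ₘ (h : Multiset Int) := by
  induction h generalizing i with
  | nil => simp at hi
  | cons y t ih =>
    cases i with
    | zero =>
      simp [pget]
      exact List.Perm.swap _ _ _
    | succ n =>
      have hn : n < t.length := by simpa using hi
      have h1 : pget (y::t) (n+1) = pget t n := by simp [pget]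
      show pget (y::t) (n+1) ::ₘ ((y :: t.set n v : List Int) : Multiset Int) = _
      rw [h1, ← Multiset.cons_coe, ← Multiset.cons_coe, Multiset.cons_swap, ih n hn,
        Multiset.cons_swap]

theorem multiset_dropLast (h : List Int) (hne : h ≠ []) :
    (h : Multiset Int) = pget h (h.length - 1) ::ₘ (h.dropLast : Multiset Int) := by
  induction h with
  | nil => simp at hne
  | cons y t ih =>
    cases t with
    | nil => simp [pget]
    | cons z u =>
      have ih' := ih (by simp)
      have h1 : pget (y::z::u) ((y::z::u).length - 1) = pget (z::u) ((z::u).length - 1) := by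
        show pget (y::z::u) (u.length + 1) = pget (z::u) (u.length)
        simp [pget]
        rfl
      rw [h1]
      calc ((y::z::u : List Int) : Multiset Int) = y ::ₘ ((z::u : List Int) : Multiset Int) := by
            rw [Multiset.cons_coe]
        _ = y ::ₘ (pget (z::u) ((z::u).length - 1) ::ₘ ((z::u).dropLast : Multiset Int)) := by
            rw [ih']
        _ = pget (z::u) ((z::u).length - 1) ::ₘ (y ::ₘ ((z::u).dropLast : Multiset Int)) :=
            Multiset.cons_swap _ _ _
        _ = pget (z::u) ((z::u).length - 1) ::ₘ ((y :: (z::u).dropLast : List Int) : Multiset Int) := by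
            rw [Multiset.cons_coe]

theorem multiset_len_eq {h s : List Int} (hm : (h : Multiset Int) = (s : Multiset Int)) :
    h.length = s.length := by
  have := congrArg Multiset.card hm
  simpa using this

theorem multiset_append_single (h : List Int) (x : Int) :
    ((h ++ [x] : List Int) : Multiset Int) = x ::ₘ (h : Multiset Int) := by
  induction h with
  | nil => rfl
  | cons y t ih =>
    show ((y :: (t ++ [x]) : List Int) : Multiset Int) = _
    rw [← Multiset.cons_coe, ih, Multiset.cons_swap, Multiset.cons_coe]

-- heap-order-from-s predicate (standard array-heap invariant)
def HFrom (h : List Int) (s : Nat) : Prop :=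
  ∀ p c, (c = 2 * p + 1 ∨ c = 2 * p + 2) → c < h.length → s ≤ p → pget h p ≤ pget h c

theorem sdLoop_spec (a : List Int) (s : Nat) (x : Int) (q : Nat) :
    q < a.length → Desc s q →
    (∀ p c, (c = 2 * p + 1 ∨ c = 2 * p + 2) → c < a.length → s ≤ p → c ≠ q →
      (if p = q then x else pget a p) ≤ (if c = q then x else pget a c)) →
    (q ≠ s → ∀ c, (c = 2 * q + 1 ∨ c = 2 * q + 2) → c < a.length →
      pget a ((q - 1) / 2) ≤ pget a c) →
    HFrom ((sdLoop a s x q).1.set (sdLoop a s x q).2 x) s ∧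
    pget a q ::ₘ (((sdLoop a s x q).1.set (sdLoop a s x q).2 x : List Int) : Multiset Int)
      = x ::ₘ (a : Multiset Int) := by
  fun_induction sdLoop a s x q with
  | case1 a q hsq pp pv hx ih =>
    intro hq hdesc hinv hgp
    simp only [pp] at *
    have hpv : pv = pget a ((q - 1) / 2) := rfl
    rw [hpv] at hx
    have hq1 : 1 ≤ q := by omega
    have hPq : (q - 1) / 2 < q := by omega
    have hqs : q ≠ s := by omega
    have hdesc' : Desc s ((q - 1) / 2) := Desc_parent hdesc hqs
    have hsP : s ≤ (q - 1) / 2 := Desc_le hdesc'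
    have hpgs : ∀ j, pget (a.set q pv) j = if j = q then pv else pget a j := pget_set a hq pv
    have hchild : q = 2 * ((q - 1) / 2) + 1 ∨ q = 2 * ((q - 1) / 2) + 2 := by omega
    obtain ⟨ihH, ihM⟩ := ih (by simp only [List.length_set]; omega) hdesc'
      (by
        intro p c hsh hc hsp hcP
        simp only [List.length_set] at hc
        have hpc : p = (c - 1) / 2 := by omega
        simp only [hpgs]
        by_cases hcq : c = q
        · have hpP : p = (q - 1) / 2 := by omega
          simp only [if_pos hpP, if_neg hcP, if_pos hcq]
          rw [hpv]
          exact le_of_lt hx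
        · by_cases hpP : p = (q - 1) / 2
          · simp only [if_pos hpP, if_neg hcP, if_neg hcq]
            have := hinv ((q - 1) / 2) c (hpP ▸ hsh) hc hsP hcq
            rw [if_neg (by omega), if_neg hcq] at this
            exact le_trans (le_of_lt hx) this
          · by_cases hpq : p = q
            · simp only [if_neg hpP, if_neg hcP, if_pos hpq, if_neg hcq]
              rw [hpv]
              exact hgp hqs c (hpq ▸ hsh) hc
            · simp only [if_neg hpP, if_neg hcP, if_neg hpq, if_neg hcq]
              have := hinv p c hsh hc hsp hcq
              rw [if_neg hpq, if_neg hcq] at this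
              exact this
      )
      (by
        intro hPs c hsh hc
        simp only [List.length_set] at hc
        have hP1 : 1 ≤ (q - 1) / 2 := by
          rcases Nat.eq_zero_or_pos ((q - 1) / 2) with h0 | h1
          · exfalso
            exact hPs (by omega)
          · exact h1
        have hG : ((q - 1) / 2 - 1) / 2 < (q - 1) / 2 := by omega
        have hsG : s ≤ ((q - 1) / 2 - 1) / 2 := Desc_le (Desc_parent hdesc' hPs)
        have hPsh : (q - 1) / 2 = 2 * (((q - 1) / 2 - 1) / 2) + 1 ∨
            (q - 1) / 2 = 2 * (((q - 1) / 2 - 1) / 2) + 2 := by omega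
        have hGP : pget a (((q - 1) / 2 - 1) / 2) ≤ pget a ((q - 1) / 2) := by
          have := hinv (((q - 1) / 2 - 1) / 2) ((q - 1) / 2) hPsh (by omega) hsG (by omega)
          rw [if_neg (by omega), if_neg (by omega)] at this
          exact this
        have hGne : ((q - 1) / 2 - 1) / 2 ≠ q := by omega
        rw [pget_set_ne hGne.symm]
        by_cases hcq : c = q
        · rw [hpgs, if_pos hcq, hpv]
          exact hGP
        · rw [hpgs, if_neg hcq]
          have hPc : pget a ((q - 1) / 2) ≤ pget a c := by
            have := hinv ((q - 1) / 2) c hsh hc hsP hcq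
            rw [if_neg (by omega), if_neg hcq] at this
            exact this
          exact le_trans hGP hPc
      )
    refine ⟨ihH, ?_⟩
    have hm1 : pget a q ::ₘ ((a.set q pv : List Int) : Multiset Int) = pv ::ₘ (a : Multiset Int) :=
      multiset_set a q hq pv
    have hpa : pget (a.set q pv) ((q - 1) / 2) = pv := by rw [hpgs, if_neg (by omega), hpv]
    rw [hpa] at ihM
    have step := congrArg (fun m => pget a q ::ₘ m) ihM
    simp only at step
    rw [Multiset.cons_swap (pget a q) pv, Multiset.cons_swap (pget a q) x, hm1,
      Multiset.cons_swap x pv] at step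
    exact (Multiset.cons_inj_right pv).mp step
  | case2 a q hsq pp pv hx =>
    intro hq hdesc hinv hgp
    have hpv : pv = pget a ((q - 1) / 2) := rfl
    rw [hpv] at hx
    have hpgs : ∀ j, pget (a.set q x) j = if j = q then x else pget a j := pget_set a hq x
    refine ⟨?_, multiset_set a q hq x⟩
    intro p c hsh hc hsp
    simp only [List.length_set] at hc
    simp only [hpgs]
    by_cases hcq : c = q
    · have hp : p = (q - 1) / 2 := by omega
      simp only [if_pos hcq, hp, if_neg (show ¬ (q - 1) / 2 = q by omega)]
      exact not_lt.mp hx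
    · by_cases hpq : p = q
      · simp only [if_pos hpq, if_neg hcq]
        have := hinv p c hsh hc hsp hcq
        rw [if_pos hpq, if_neg hcq] at this
        exact this
      · simp only [if_neg hpq, if_neg hcq]
        have := hinv p c hsh hc hsp hcq
        rw [if_neg hpq, if_neg hcq] at this
        exact this
  | case3 a q hge =>
    intro hq hdesc hinv hgp
    have hqs : q = s := by
      have := Desc_le hdesc
      omega
    have hpgs : ∀ j, pget (a.set q x) j = if j = q then x else pget a j := pget_set a hq x
    refine ⟨?_, multiset_set a q hq x⟩
    intro p c hsh hc hsp
    simp only [List.length_set] at hc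
    simp only [hpgs]
    by_cases hcq : c = q
    · exfalso
      omega
    · by_cases hpq : p = q
      · simp only [if_pos hpq, if_neg hcq]
        have := hinv p c hsh hc hsp hcq
        rw [if_pos hpq, if_neg hcq] at this
        exact this
      · simp only [if_neg hpq, if_neg hcq]
        have := hinv p c hsh hc hsp hcq
        rw [if_neg hpq, if_neg hcq] at this
        exact this

theorem suLoop_spec (a : List Int) (ep q : Nat) (s : Nat) :
    ep = a.length → q < a.length → Desc s q →
    (∀ p c, (c = 2 * p + 1 ∨ c = 2 * p + 2) → c < a.length → s ≤ p → p ≠ q → c ≠ q →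
      pget a p ≤ pget a c) →
    (q ≠ s → ∀ c, (c = 2 * q + 1 ∨ c = 2 * q + 2) → c < a.length →
      pget a ((q - 1) / 2) ≤ pget a c) →
    (suLoop a ep q).1.length = a.length ∧ Desc s (suLoop a ep q).2 ∧
    (suLoop a ep q).2 < a.length ∧ a.length ≤ 2 * (suLoop a ep q).2 + 1 ∧
    (∀ p c, (c = 2 * p + 1 ∨ c = 2 * p + 2) → c < a.length → s ≤ p →
      p ≠ (suLoop a ep q).2 → c ≠ (suLoop a ep q).2 →
      pget (suLoop a ep q).1 p ≤ pget (suLoop a ep q).1 c) ∧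
    (∀ y : Int, (((suLoop a ep q).1.set (suLoop a ep q).2 y : List Int) : Multiset Int)
      = ((a.set q y : List Int) : Multiset Int)) := by
  fun_induction suLoop a ep q with
  | case1 a q hlt cp ih =>
    intro hep hq hdesc hinv hgp
    subst hep
    -- facts about the chosen child cp
    have hcp1 : cp = 2 * q + 1 ∨ cp = 2 * q + 2 := by
      simp only [cp]
      split <;> simp
    have hcp2 : cp < a.length := by
      simp only [cp]
      split
      · rename_i hc; exact hc.1
      · exact hlt
    have hmin : ∀ c, (c = 2 * q + 1 ∨ c = 2 * q + 2) → c < a.length → pget a cp ≤ pget a c := by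
      intro c hsh hc
      simp only [cp]
      split
      · rename_i hcond
        rcases hsh with rfl | rfl
        · exact not_lt.mp hcond.2
        · exact le_refl _
      · rename_i hcond
        rcases hsh with rfl | rfl
        · exact le_refl _
        · rcases not_and_or.mp hcond with h | h
          · exact absurd hc h
          · exact le_of_lt (not_not.mp h)
    have hqcp : q < cp := by omega
    have hscp : s ≤ q := Desc_le hdesc
    have hdesc' : Desc s cp := by
      rcases hcp1 with h | h
      · rw [h]; exact Desc_child1 hdesc
      · rw [h]; exact Desc_child2 hdesc
    have hpgs : ∀ j, pget (a.set q (pget a cp)) j = if j = q then pget a cp else pget a j :=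
      pget_set a hq (pget a cp)
    obtain ⟨C1, C2, C3, C4, C5, C6⟩ := ih (by simp) (by simpa using hcp2) hdesc'
      (by
        intro p c hsh hc hsp hpcp hccp
        simp only [List.length_set] at hc
        simp only [hpgs]
        by_cases hcq : c = q
        · -- p = parent q, q ≠ s
          have hq1 : 1 ≤ q := by
            rcases Nat.eq_zero_or_pos q with rfl | h1
            · omega
            · exact h1
          have hqs : q ≠ s := by omega
          have hp : p = (q - 1) / 2 := by omega
          simp only [if_pos hcq, if_neg (show ¬ p = q by omega)]
          rw [hp]
          exact hgp hqs cp hcp1 hcp2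
        · by_cases hpq : p = q
          · simp only [if_pos hpq, if_neg hcq]
            exact hmin c (hpq ▸ hsh) hc
          · simp only [if_neg hpq, if_neg hcq]
            exact hinv p c hsh hc hsp hpq hcq
      )
      (by
        intro hcps c hsh hc
        simp only [List.length_set] at hc
        have hpar : (cp - 1) / 2 = q := by omega
        have hcq : c ≠ q := by omega
        have hccp : c ≠ cp := by omega
        simp only [hpgs, hpar, if_neg hcq]
        exact hinv cp c hsh hc (by omega) (by omega) hcq
      )
    simp only [List.length_set] at C1 C3 C4
    refine ⟨C1, C2, C3, C4, ?_, ?_⟩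
    · intro p c hsh hc hsp hpr hcr
      exact C5 p c hsh (by simpa using hc) hsp hpr hcr
    · intro y
      have h6 := C6 y
      -- ↑(r.set r2 y) = ↑((a.set q acp).set cp y); chain to ↑(a.set q y)
      rw [h6]
      have ms1 := multiset_set (a.set q (pget a cp)) cp (by simpa using hcp2) y
      rw [hpgs cp, if_neg (by omega)] at ms1
      have ms2 := multiset_set a q hq (pget a cp)
      have ms3 := multiset_set a q hq y
      have step := congrArg (fun m => pget a q ::ₘ m) ms1
      simp only at step
      rw [Multiset.cons_swap (pget a q) (pget a cp), Multiset.cons_swap (pget a q) y, ms2,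
        Multiset.cons_swap y (pget a cp)] at step
      have step2 := (Multiset.cons_inj_right (pget a cp)).mp step
      rw [← ms3] at step2
      exact (Multiset.cons_inj_right (pget a q)).mp step2
  | case2 a q hge =>
    intro hep hq hdesc hinv hgp
    subst hep
    exact ⟨rfl, hdesc, hq, by omega, hinv, fun y => rfl⟩

theorem siftdown_spec (a : List Int) (s q : Nat) (hq : q < a.length) (hdesc : Desc s q)
    (hinv : ∀ p c, (c = 2 * p + 1 ∨ c = 2 * p + 2) → c < a.length → s ≤ p → c ≠ q →
      (if p = q then pget a q else pget a p) ≤ (if c = q then pget a q else pget a c))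
    (hgp : q ≠ s → ∀ c, (c = 2 * q + 1 ∨ c = 2 * q + 2) → c < a.length →
      pget a ((q - 1) / 2) ≤ pget a c) :
    HFrom (siftdown a s q) s ∧
    ((siftdown a s q : List Int) : Multiset Int) = (a : Multiset Int) := by
  obtain ⟨H, M⟩ := sdLoop_spec a s (pget a q) q hq hdesc hinv hgp
  refine ⟨H, ?_⟩
  exact (Multiset.cons_inj_right (pget a q)).mp M

theorem siftup_spec (a : List Int) (q : Nat) (hq : q < a.length)
    (hinv : ∀ p c, (c = 2 * p + 1 ∨ c = 2 * p + 2) → c < a.length → q ≤ p → p ≠ q → c ≠ q →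
      pget a p ≤ pget a c) :
    HFrom (siftup a q) q ∧ ((siftup a q : List Int) : Multiset Int) = (a : Multiset Int) := by
  obtain ⟨C1, C2, C3, C4, C5, C6⟩ := suLoop_spec a a.length q q rfl hq
    (Desc_self q) hinv (fun hne => absurd rfl hne)
  have hr2 : (suLoop a a.length q).2 < ((suLoop a a.length q).1.set (suLoop a a.length q).2 (pget a q)).length := by
    rw [List.length_set, C1]
    exact C3
  have hb : ∀ j, pget ((suLoop a a.length q).1.set (suLoop a a.length q).2 (pget a q)) j =
      if j = (suLoop a a.length q).2 then pget a q else pget (suLoop a a.length q).1 j :=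
    pget_set _ (by rw [C1]; exact C3) _
  obtain ⟨H, M⟩ := siftdown_spec
    ((suLoop a a.length q).1.set (suLoop a a.length q).2 (pget a q)) q (suLoop a a.length q).2
    hr2 C2
    (by
      intro p c hsh hc hsp hcr
      simp only [List.length_set, C1] at hc
      by_cases hpr : p = (suLoop a a.length q).2
      · exfalso
        omega
      · simp only [if_neg hpr, if_neg hcr, hb]
        exact C5 p c hsh hc hsp hpr hcr
        )
    (by
      intro hne c hsh hc
      exfalso
      simp only [List.length_set, C1] at hc
      omega)
  constructor
  · show HFrom (siftdown _ q (suLoop a a.length q).2) q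
    exact H
  · show ((siftdown _ q (suLoop a a.length q).2 : List Int) : Multiset Int) = _
    rw [M, C6 (pget a q)]
    exact (Multiset.cons_inj_right (pget a q)).mp (multiset_set a q hq (pget a q))

theorem heapify_fold : ∀ (i : Nat) (acc : List Int), 2 * i ≤ acc.length → HFrom acc i →
    HFrom ((List.range i).reverse.foldl (fun b j => siftup b j) acc) 0 ∧
    (((List.range i).reverse.foldl (fun b j => siftup b j) acc : List Int) : Multiset Int)
      = (acc : Multiset Int) ∧
    ((List.range i).reverse.foldl (fun b j => siftup b j) acc).length = acc.length := by
  intro i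
  induction i with
  | zero =>
    intro acc _ hH
    exact ⟨hH, rfl, rfl⟩
  | succ i ih =>
    intro acc hle hH
    have hi : i < acc.length := by omega
    obtain ⟨H1, M1⟩ := siftup_spec acc i hi
      (fun p c hsh hc hsp hpi hci => hH p c hsh hc (by omega))
    have hlen1 : (siftup acc i).length = acc.length := siftup_len acc i
    have hrw : (List.range (i+1)).reverse = i :: (List.range i).reverse := by
      rw [List.range_succ, List.reverse_append]
      rfl
    rw [hrw]
    have step : (i :: (List.range i).reverse).foldl (fun b j => siftup b j) acc
        = (List.range i).reverse.foldl (fun b j => siftup b j) (siftup acc i) := rfl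
    rw [step]
    obtain ⟨A1, A2, A3⟩ := ih (siftup acc i) (by omega)
      (by
        intro p c hsh hc hsp
        exact H1 p c hsh hc hsp)
    exact ⟨A1, by rw [A2, M1], by rw [A3, hlen1]⟩

theorem heapify_spec (xs : List Int) :
    HFrom (heapify xs) 0 ∧ ((heapify xs : List Int) : Multiset Int) = (xs : Multiset Int) := by
  have := heapify_fold (xs.length / 2) xs (by omega)
    (by
      intro p c hsh hc hsp
      exfalso
      omega)
  exact ⟨this.1, this.2.1⟩

theorem pget_append_lt {h : List Int} {j : Nat} (hj : j < h.length) (x : Int) :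
    pget (h ++ [x]) j = pget h j := by
  simp [pget, List.getD_eq_getElem?_getD, List.getElem?_append_left hj]

theorem heappush_spec (h : List Int) (x : Int) (hh : HFrom h 0) :
    HFrom (heappush h x) 0 ∧
    ((heappush h x : List Int) : Multiset Int) = x ::ₘ (h : Multiset Int) := by
  have hlen : (h ++ [x]).length = h.length + 1 := by simp
  obtain ⟨H, M⟩ := siftdown_spec (h ++ [x]) 0 h.length (by omega) (Desc_zero h.length)
    (by
      intro p c hsh hc hsp hcq
      rw [hlen] at hc
      by_cases hpq : p = h.length
      · exfalso
        omega
      · have hcl : c < h.length := by omega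
        have hpl : p < h.length := by omega
        simp only [if_neg hpq, if_neg hcq, pget_append_lt hcl, pget_append_lt hpl]
        exact hh p c hsh hcl hsp)
    (by
      intro hne c hsh hc
      exfalso
      rw [hlen] at hc
      omega)
  refine ⟨H, ?_⟩
  show ((siftdown (h ++ [x]) 0 h.length : List Int) : Multiset Int) = _
  rw [M, multiset_append_single]

theorem pget_dropLast {h : List Int} {j : Nat} (hj : j < h.length - 1) :
    pget h.dropLast j = pget h j := by
  have h1 : j < h.dropLast.length := by simp; omega
  have h2 : j < h.length := by omega
  rw [show pget h.dropLast j = h.dropLast[j] by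
      simp [pget, List.getD_eq_getElem?_getD, List.getElem?_eq_getElem h1],
    show pget h j = h[j] by
      simp [pget, List.getD_eq_getElem?_getD, List.getElem?_eq_getElem h2]]
  exact List.getElem_dropLast h1

theorem heappop_spec (h : List Int) (hne : h ≠ []) (hh : HFrom h 0) :
    (heappop h).1 = pget h 0 ∧ HFrom (heappop h).2 0 ∧
    (h : Multiset Int) = pget h 0 ::ₘ ((heappop h).2 : Multiset Int) := by
  have hlen : 0 < h.length := List.length_pos_iff.mpr hne
  have hdl : h.dropLast.length = h.length - 1 := by simp
  by_cases hemp : h.dropLast.isEmpty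
  · have hone : h.length = 1 := by
      have := List.isEmpty_iff.mp hemp
      have : h.dropLast.length = 0 := by rw [this]; rfl
      omega
    have hstep : heappop h = (pget h (h.length - 1), h.dropLast) := by
      simp only [heappop, if_pos hemp]
    rw [hstep]
    refine ⟨by rw [hone], ?_, ?_⟩
    · intro p c hsh hc hsp
      exfalso
      rw [hdl] at hc
      omega
    · have := multiset_dropLast h hne
      rw [hone] at this ⊢
      exact this
  · have h2 : 2 ≤ h.length := by
      rcases Nat.lt_or_ge h.length 2 with hl | hl
      · exfalso
        have : h.length = 1 := by omega
        have : h.dropLast.length = 0 := by omega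
        exact hemp (List.isEmpty_iff.mpr (List.eq_nil_of_length_eq_zero this))
      · exact hl
    have hstep : heappop h =
        (pget h.dropLast 0, siftup (h.dropLast.set 0 (pget h (h.length - 1))) 0) := by
      simp only [heappop, if_neg hemp]
    have hr0 : pget h.dropLast 0 = pget h 0 := pget_dropLast (by omega)
    have hblen : (h.dropLast.set 0 (pget h (h.length - 1))).length = h.length - 1 := by
      simp
    obtain ⟨H, M⟩ := siftup_spec (h.dropLast.set 0 (pget h (h.length - 1))) 0
      (by omega)
      (by
        intro p c hsh hc hsp hp0 hc0
        rw [hblen] at hc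
        have hcl : c < h.length - 1 := hc
        have hpl : p < h.length - 1 := by omega
        rw [pget_set_ne (fun he => hp0 he.symm), pget_set_ne (fun he => hc0 he.symm),
          pget_dropLast hcl, pget_dropLast hpl]
        exact hh p c hsh (by omega) (Nat.zero_le _))
    rw [hstep]
    refine ⟨hr0, H, ?_⟩
    rw [M]
    have ms := multiset_set h.dropLast 0 (by omega) (pget h (h.length - 1))
    rw [hr0] at ms
    rw [ms]
    exact multiset_dropLast h hne

theorem root_min (h : List Int) (hh : HFrom h 0) : ∀ j, j < h.length → pget h 0 ≤ pget h j := by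
  intro j
  induction j using Nat.strong_induction_on with
  | _ j ih =>
    intro hj
    rcases Nat.eq_zero_or_pos j with rfl | hpos
    · exact le_refl _
    · have hc : j = 2 * ((j-1)/2) + 1 ∨ j = 2 * ((j-1)/2) + 2 := by omega
      have h1 : pget h ((j-1)/2) ≤ pget h j := hh _ _ hc hj (Nat.zero_le _)
      have h2 : pget h 0 ≤ pget h ((j-1)/2) := ih _ (by omega) (by omega)
      exact le_trans h2 h1

theorem pget_mem {h : List Int} {j : Nat} (hj : j < h.length) : pget h j ∈ h := by
  have : pget h j = h[j] := by simp [pget, List.getD_eq_getElem?_getD, List.getElem?_eq_getElem hj]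
  rw [this]; exact List.getElem_mem hj

theorem mem_pget {h : List Int} {x : Int} (hx : x ∈ h) : ∃ j, j < h.length ∧ pget h j = x := by
  obtain ⟨j, hj, hEq⟩ := List.mem_iff_getElem.mp hx
  exact ⟨j, hj, by simp [pget, List.getD_eq_getElem?_getD, List.getElem?_eq_getElem hj, hEq]⟩

-- pymin is a lower bound of its list
theorem foldl_min_le : ∀ (t : List Int) (a x : Int), x ∈ a :: t → t.foldl min a ≤ x := by
  intro t
  induction t with
  | nil =>
    intro a x hx
    simp at hx
    simp [hx]
  | cons b t ih =>
    intro a x hx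
    show t.foldl min (min a b) ≤ x
    rcases List.mem_cons.mp hx with h1 | h1
    · rw [h1]
      exact le_trans (ih (min a b) (min a b) (by simp)) (min_le_left a b)
    · rcases List.mem_cons.mp h1 with h2 | h2
      · rw [h2]
        exact le_trans (ih (min a b) (min a b) (by simp)) (min_le_right a b)
      · exact ih (min a b) x (by simp [h2])

theorem pymin_le {s : List Int} {x : Int} (hx : x ∈ s) : pymin s ≤ x := by
  cases s with
  | nil => simp at hx
  | cons a t => exact foldl_min_le t a x hx

-- the heap's root is Python's min() of any list with the same multiset of elements
theorem head_eq_pymin (h s : List Int) (hh : HFrom h 0)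
    (hm : (h : Multiset Int) = (s : Multiset Int)) (hne : h ≠ []) :
    pget h 0 = pymin s := by
  have hmem : ∀ x : Int, x ∈ h ↔ x ∈ s := by
    intro x
    constructor
    · intro hx
      exact Multiset.mem_coe.mp (hm ▸ Multiset.mem_coe.mpr hx)
    · intro hx
      exact Multiset.mem_coe.mp (hm ▸ Multiset.mem_coe.mpr hx)
  have hlen : 0 < h.length := List.length_pos_iff.mpr hne
  have h0s : pget h 0 ∈ s := (hmem _).mp (pget_mem hlen)
  have hminh : pymin s ∈ h := by
    have hsne : s ≠ [] := by
      intro hnil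
      rw [hnil] at h0s
      simp at h0s
    exact (hmem _).mpr (pymin_mem hsne)
  obtain ⟨j, hj, hje⟩ := mem_pget hminh
  have h1 : pget h 0 ≤ pymin s := hje ▸ root_min h hh j hj
  have h2 : pymin s ≤ pget h 0 := pymin_le h0s
  omega

theorem erase_multiset {s : List Int} {a : Int} (ha : a ∈ s) :
    (s : Multiset Int) = a ::ₘ ((s.erase a : List Int) : Multiset Int) := by
  have := List.perm_cons_erase ha
  have h2 : ((s : List Int) : Multiset Int) = ((a :: s.erase a : List Int) : Multiset Int) :=
    Multiset.coe_eq_coe.mpr this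
  rw [h2, Multiset.cons_coe]

-- the core invariant: heap state of A's loop and bag state of B's loop carry the same multiset
theorem loop_agree (r : Int) : ∀ (fuel : Nat) (h s : List Int) (ops : Int), h.length ≤ fuel →
    HFrom h 0 → (h : Multiset Int) = (s : Multiset Int) →
    (loopAF fuel r h ops).2 = (loopC r s ops).2 ∧ HFrom (loopAF fuel r h ops).1 0 ∧
    ((loopAF fuel r h ops).1 : Multiset Int) = ((loopC r s ops).1 : Multiset Int) ∧
    (s ≠ [] → (loopC r s ops).1 ≠ []) := by
  intro fuel
  induction fuel with
  | zero =>
    intro h s ops hn hH hM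
    have h0 : h.length = 0 := Nat.le_zero.mp hn
    have hs0 : s.length = 0 := by rw [← multiset_len_eq hM, h0]
    have hsnil : s = [] := List.eq_nil_of_length_eq_zero hs0
    subst hsnil
    have hBexit : loopC r [] ops = ([], ops) := by rw [loopC]; simp
    rw [hBexit]
    exact ⟨rfl, hH, hM, fun hc => absurd rfl hc⟩
  | succ fuel ih =>
    intro h s ops hn hH hM
    have hlen : h.length = s.length := multiset_len_eq hM
    by_cases hg : 1 < h.length ∧ pget h 0 < r
    · obtain ⟨hg1, hg2⟩ := hg
      have hne : h ≠ [] := by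
        intro he
        rw [he] at hg1
        simp at hg1
      have hslen : 1 < s.length := by omega
      have hsne : s ≠ [] := List.ne_nil_of_length_pos (by omega)
      have ha0 : pget h 0 = pymin s := head_eq_pymin h s hH hM hne
      -- first pop / first min+remove
      obtain ⟨E1, H1, M1⟩ := heappop_spec h hne hH
      have hMs1 : ((heappop h).2 : Multiset Int) = ((s.erase (pymin s) : List Int) : Multiset Int) := by
        have key : pget h 0 ::ₘ ((heappop h).2 : Multiset Int)
            = pget h 0 ::ₘ ((s.erase (pymin s) : List Int) : Multiset Int) := by
          rw [← M1, hM, erase_multiset (pymin_mem hsne), ha0]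
        exact (Multiset.cons_inj_right (pget h 0)).mp key
      have hlen1 : (heappop h).2.length = s.length - 1 := by
        rw [multiset_len_eq hMs1, List.length_erase_of_mem (pymin_mem hsne)]
      have h1ne : (heappop h).2 ≠ [] := List.ne_nil_of_length_pos (by rw [hlen1]; omega)
      have hs1ne : s.erase (pymin s) ≠ [] :=
        List.ne_nil_of_length_pos (by rw [List.length_erase_of_mem (pymin_mem hsne)]; omega)
      -- second pop / second min+remove
      obtain ⟨E2, H2, M2⟩ := heappop_spec (heappop h).2 h1ne H1
      have hb0 : pget (heappop h).2 0 = pymin (s.erase (pymin s)) :=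
        head_eq_pymin _ _ H1 hMs1 h1ne
      have hMs2 : ((heappop (heappop h).2).2 : Multiset Int)
          = (((s.erase (pymin s)).erase (pymin (s.erase (pymin s))) : List Int) : Multiset Int) := by
        have key : pget (heappop h).2 0 ::ₘ ((heappop (heappop h).2).2 : Multiset Int)
            = pget (heappop h).2 0
              ::ₘ (((s.erase (pymin s)).erase (pymin (s.erase (pymin s))) : List Int) : Multiset Int) := by
          rw [← M2, hMs1, erase_multiset (pymin_mem hs1ne), hb0]
        exact (Multiset.cons_inj_right (pget (heappop h).2 0)).mp key
      -- merged values coincide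
      have hmg : 1 * (heappop h).1 + 2 * (heappop (heappop h).2).1
          = pymin s + 2 * pymin (s.erase (pymin s)) := by
        rw [E1, E2, ha0, hb0]
        ring
      -- push / append
      obtain ⟨Hp, Mp⟩ := heappush_spec (heappop (heappop h).2).2
        (pymin s + 2 * pymin (s.erase (pymin s))) H2
      have M3 : ((heappush (heappop (heappop h).2).2 (pymin s + 2 * pymin (s.erase (pymin s)))
            : List Int) : Multiset Int)
          = (((s.erase (pymin s)).erase (pymin (s.erase (pymin s)))
              ++ [pymin s + 2 * pymin (s.erase (pymin s))] : List Int) : Multiset Int) := by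
        rw [Mp, hMs2, multiset_append_single]
      have hfuel : (heappush (heappop (heappop h).2).2
          (pymin s + 2 * pymin (s.erase (pymin s)))).length ≤ fuel := by
        have := multiset_len_eq M3
        simp only [List.length_append, List.length_cons, List.length_nil,
          List.length_erase_of_mem (pymin_mem hs1ne),
          List.length_erase_of_mem (pymin_mem hsne)] at this
        omega
      have hAstep : loopAF (fuel + 1) r h ops = loopAF fuel r
          (heappush (heappop (heappop h).2).2
            (1 * (heappop h).1 + 2 * (heappop (heappop h).2).1)) (ops + 1) := by
        rw [loopAF, if_pos ⟨hg1, hg2⟩]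
      rw [hmg] at hAstep
      have hBstep : loopC r s ops = loopC r
          ((s.erase (pymin s)).erase (pymin (s.erase (pymin s)))
            ++ [pymin s + 2 * pymin (s.erase (pymin s))]) (ops + 1) := by
        rw [loopC, dif_pos ⟨hslen, ha0 ▸ hg2⟩]
      obtain ⟨c1, c2, c3, c4⟩ := ih
        (heappush (heappop (heappop h).2).2 (pymin s + 2 * pymin (s.erase (pymin s))))
        ((s.erase (pymin s)).erase (pymin (s.erase (pymin s)))
          ++ [pymin s + 2 * pymin (s.erase (pymin s))]) (ops + 1) hfuel Hp M3
      rw [hAstep, hBstep]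
      exact ⟨c1, c2, c3, fun _ => c4 (by simp)⟩
    · have hAexit : loopAF (fuel + 1) r h ops = (h, ops) := by
        rw [loopAF, if_neg hg]
      have hBexit : loopC r s ops = (s, ops) := by
        rw [loopC, dif_neg]
        intro hc
        obtain ⟨hc1, hc2⟩ := hc
        have hne : h ≠ [] := by
          intro he
          rw [he] at hlen
          simp at hlen
          omega
        exact hg ⟨by omega, by rw [head_eq_pymin h s hH hM hne]; exact hc2⟩
      rw [hAexit, hBexit]
      exact ⟨rfl, hH, hM, fun hc => hc⟩

-- ===== VERDICT (by name: the statement is the Claim_ definition above) =====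
theorem cookies_spec : Claim_equal_cookies := by
  intro r xs _hdom hpre
  show cookies r xs = cookies_alt r xs
  obtain ⟨Hh, Mh⟩ := heapify_spec xs
  obtain ⟨c1, c2, c3, c4⟩ := loop_agree r (heapify xs).length (heapify xs) xs 0
    (Nat.le_refl _) Hh (by rw [Mh])
  have hBne := c4 hpre
  have hAne : (loopAF (heapify xs).length r (heapify xs) 0).1 ≠ [] := by
    intro he
    have hl := multiset_len_eq c3
    rw [he] at hl
    simp only [List.length_nil] at hl
    exact hBne (List.eq_nil_of_length_eq_zero hl.symm)
  have hpg : pget (loopAF (heapify xs).length r (heapify xs) 0).1 0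
      = pymin (loopC r xs 0).1 :=
    head_eq_pymin _ _ c2 c3 hAne
  show (if r ≤ pget (loopAF (heapify xs).length r (heapify xs) 0).1 0
        then (loopAF (heapify xs).length r (heapify xs) 0).2 else -1)
    = (if r ≤ pymin (loopC r xs 0).1 then (loopC r xs 0).2 else -1)
  rw [hpg, c1]
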